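-- pv_equiv track=rewrite | github.com/ElijahAhianyo/yle-dl | yledl/extractors.py | remove_genre_prefix
-- ===== SOURCE A (Python) =====
-- def remove_genre_prefix(title):
--     genre_prefixes = ['Elokuva:', 'Kino:', 'Kino Klassikko:',
--                       'Kino Suomi:', 'Kotikatsomo:', 'Uusi Kino:', 'Dok:',
--                       'Dokumenttiprojekti:', 'Historia:']
--     for prefix in genre_prefixes:
--         if title.startswith(prefix):
--             return title[len(prefix):].strip()
--     return title
-- ===== SOURCE B (Python) =====
-- def remove_genre_prefix(title):
--     prefixes = {'Elokuva:', 'Kino:', 'Kino Klassikko:', 'Kino Suomi:',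
--                 'Kotikatsomo:', 'Uusi Kino:', 'Dok:', 'Dokumenttiprojekti:',
--                 'Historia:'}
--     i = title.find(':')
--     if i != -1 and title[:i + 1] in prefixes:
--         return title[i + 1:].strip()
--     return title
-- ===== Notes on version B (the rewrite author's own statement) =====
-- stated objective: alternative
-- what changed: Replaces the sequential startswith loop over nine genre prefixes by a single scan for the first colon followed by one set-membership test of the candidate prefix up to and including that colon.
import Mathlib
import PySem

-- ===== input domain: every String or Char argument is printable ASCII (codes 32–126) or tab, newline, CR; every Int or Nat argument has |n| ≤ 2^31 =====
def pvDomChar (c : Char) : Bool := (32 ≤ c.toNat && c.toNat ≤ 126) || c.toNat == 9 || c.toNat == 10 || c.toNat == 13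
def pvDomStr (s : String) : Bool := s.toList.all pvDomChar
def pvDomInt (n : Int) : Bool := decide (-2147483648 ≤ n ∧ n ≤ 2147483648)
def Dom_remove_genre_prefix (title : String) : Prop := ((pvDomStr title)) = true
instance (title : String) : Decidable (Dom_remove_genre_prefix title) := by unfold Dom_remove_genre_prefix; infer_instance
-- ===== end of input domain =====

-- B replaces A's sequential startswith loop over nine prefixes by a single scan for the
-- first ':' followed by one set-membership test of the candidate prefix (objective: alternative).

-- ===== PORT A =====
-- the 'for prefix in genre_prefixes:' loop, recursion over the prefix list
def agpLoop (prefixes : List String) (title : String) : String :=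
  match prefixes with
  | [] => title
  | p :: ps =>
      if PySem.Str.startswith title p then
        PySem.Str.strip (PySem.Str.slice title (some (PySem.Str.len p : Int)) none)
      else agpLoop ps title

def remove_genre_prefix (title : String) : String :=
  agpLoop ["Elokuva:", "Kino:", "Kino Klassikko:", "Kino Suomi:", "Kotikatsomo:",
           "Uusi Kino:", "Dok:", "Dokumenttiprojekti:", "Historia:"] title

-- ===== PORT B =====
def remove_genre_prefix_alt (title : String) : String :=
  let i := PySem.Str.find title ":"
  if i ≠ -1 ∧ PySem.Str.slice title none (some (i + 1)) ∈
      ["Elokuva:", "Kino:", "Kino Klassikko:", "Kino Suomi:", "Kotikatsomo:",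
       "Uusi Kino:", "Dok:", "Dokumenttiprojekti:", "Historia:"] then
    PySem.Str.strip (PySem.Str.slice title (some (i + 1)) none)
  else title

-- ===== PRECONDITION & SPEC =====
def Spec_remove_genre_prefix (title : String) (out : String) : Prop := out = remove_genre_prefix_alt title
instance (title : String) (out : String) : Decidable (Spec_remove_genre_prefix title out) := by unfold Spec_remove_genre_prefix; infer_instance

-- ===== CLAIM (what is proved, stated in full; the proofs are below) =====
def Claim_equal_remove_genre_prefix : Prop := ∀ (title : String), Dom_remove_genre_prefix title → Spec_remove_genre_prefix title (remove_genre_prefix title)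

-- ===== LEMMAS AND PROOFS =====

-- a one-character pattern is a prefix of l.drop n exactly when l[n]? is that character
theorem single_prefix_drop (l : List Char) (c : Char) (n : Nat) :
    [c] <+: l.drop n ↔ l[n]? = some c := by
  rw [← List.head?_drop]
  constructor
  · rintro ⟨t, ht⟩; rw [← ht]; rfl
  · intro h
    cases hm : l.drop n with
    | nil => rw [hm] at h; simp at h
    | cons a t =>
        rw [hm] at h; simp at h; subst h
        exact ⟨t, by simp⟩

-- find of a singleton pattern is the first index holding that character
theorem find_singleton_eq (l : List Char) (c : Char) (n : Nat)
    (hn : l[n]? = some c) (hb : ∀ j < n, l[j]? ≠ some c) :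
    PySem.Chars.find l [c] = (n : Int) := by
  have hocc : [c] <+: l.drop n := (single_prefix_drop l c n).mpr hn
  have hinf : [c] <:+: l := List.infix_iff_prefix_suffix.mpr
    ⟨l.drop n, hocc, List.drop_suffix n l⟩
  have hpos : 0 ≤ PySem.Chars.find l [c] := (PySem.Chars.find_nonneg_iff l [c]).mpr hinf
  obtain ⟨h1, h2⟩ := PySem.Chars.find_spec hpos
  have hf := (single_prefix_drop l c _).mp h1
  rcases Nat.lt_trichotomy (PySem.Chars.find l [c]).toNat n with h | h | h
  · exact absurd hf (hb _ h)
  · omega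
  · exact absurd hocc (h2 n h)

-- if p is a prefix of l and ':' first occurs in p at index n, then find l ":" = n
theorem find_of_prefix (l p : List Char) (n : Nat) (hp : p <+: l)
    (hn : p[n]? = some ':') (hb : ∀ j < n, p[j]? ≠ some ':') :
    PySem.Chars.find l [':'] = (n : Int) := by
  obtain ⟨rest, rfl⟩ := hp
  have hlen : n < p.length := by
    by_contra h
    rw [List.getElem?_eq_none (by omega)] at hn; simp at hn
  apply find_singleton_eq
  · rw [List.getElem?_append_left hlen]; exact hn
  · intro j hj
    rw [List.getElem?_append_left (by omega)]
    exact hb j hj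

-- matched case: if title starts with p (one of the prefixes, ':' only at its end),
-- B takes its strip branch with i + 1 = p.length
theorem alt_matched (t p : String) (n : Nat)
    (hmem : p ∈ ["Elokuva:", "Kino:", "Kino Klassikko:", "Kino Suomi:", "Kotikatsomo:",
                 "Uusi Kino:", "Dok:", "Dokumenttiprojekti:", "Historia:"])
    (hlen : PySem.Str.len p = (n : Int) + 1)
    (hn : p.toList[n]? = some ':') (hb : ∀ j < n, p.toList[j]? ≠ some ':')
    (hsw : PySem.Str.startswith t p = true) :
    remove_genre_prefix_alt t =
      PySem.Str.strip (PySem.Str.slice t (some (PySem.Str.len p)) none) := by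
  have hpre : p.toList <+: t.toList := by
    rw [PySem.Str.startswith_eq] at hsw
    exact (PySem.Chars.startswith_iff _ _).mp hsw
  have hcolon : (":" : String).toList = [':'] := by decide
  have hfind : PySem.Str.find t ":" = (n : Int) := by
    rw [PySem.Str.find_eq, hcolon]
    exact find_of_prefix t.toList p.toList n hpre hn hb
  have hl : p.toList.length = n + 1 := by
    have h := hlen
    simp only [PySem.Str.len_eq] at h
    exact_mod_cast h
  have htake : PySem.Str.slice t none (some ((n : Int) + 1)) = p := by
    apply String.toList_inj.mp
    rw [PySem.Str.toList_slice]
    obtain ⟨rest, hrest⟩ := hpre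
    rw [← hrest]
    have : ((n : Int) + 1) = ((p.toList.length : Nat) : Int) := by omega
    rw [this, PySem.Chars.slice_eq_listSlice, PySem.List.slice_to_natCast, List.take_left]
  unfold remove_genre_prefix_alt
  rw [hfind, if_pos ⟨by omega, by rw [htake]; exact hmem⟩, hlen]

-- unmatched case: if title starts with none of the prefixes, B returns title
theorem alt_unmatched (t : String)
    (h1 : ¬ PySem.Str.startswith t "Elokuva:" = true)
    (h2 : ¬ PySem.Str.startswith t "Kino:" = true)
    (h3 : ¬ PySem.Str.startswith t "Kino Klassikko:" = true)
    (h4 : ¬ PySem.Str.startswith t "Kino Suomi:" = true)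
    (h5 : ¬ PySem.Str.startswith t "Kotikatsomo:" = true)
    (h6 : ¬ PySem.Str.startswith t "Uusi Kino:" = true)
    (h7 : ¬ PySem.Str.startswith t "Dok:" = true)
    (h8 : ¬ PySem.Str.startswith t "Dokumenttiprojekti:" = true)
    (h9 : ¬ PySem.Str.startswith t "Historia:" = true) :
    remove_genre_prefix_alt t = t := by
  unfold remove_genre_prefix_alt
  rw [if_neg]
  rintro ⟨hne, hmem⟩
  have hnneg : 0 ≤ PySem.Str.find t ":" := by
    have := PySem.Chars.neg_one_le_find t.toList ":".toList
    rw [PySem.Str.find_eq] at hne ⊢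
    omega
  have hsw : ∀ p : String, PySem.Str.slice t none (some (PySem.Str.find t ":" + 1)) = p →
      PySem.Str.startswith t p = true := by
    intro p hp
    rw [PySem.Str.startswith_eq]
    apply (PySem.Chars.startswith_iff _ _).mpr
    have h0 : (0:Int) ≤ PySem.Str.find t ":" + 1 := by omega
    have hthis := congrArg String.toList hp
    rw [PySem.Str.toList_slice, PySem.Chars.slice_eq_listSlice,
        PySem.List.slice_to _ h0] at hthis
    rw [← hthis]
    exact List.take_prefix _ _
  simp only [List.mem_cons, List.not_mem_nil, or_false] at hmem
  rcases hmem with h | h | h | h | h | h | h | h | h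
  · exact h1 (hsw _ h)
  · exact h2 (hsw _ h)
  · exact h3 (hsw _ h)
  · exact h4 (hsw _ h)
  · exact h5 (hsw _ h)
  · exact h6 (hsw _ h)
  · exact h7 (hsw _ h)
  · exact h8 (hsw _ h)
  · exact h9 (hsw _ h)

-- ===== VERDICT (by name: the statement is the Claim_ definition above) =====
theorem remove_genre_prefix_spec : Claim_equal_remove_genre_prefix := by
  intro t _
  unfold Spec_remove_genre_prefix remove_genre_prefix
  by_cases h1 : PySem.Str.startswith t "Elokuva:" = true
  · simp only [agpLoop, h1, if_true]
    exact (alt_matched t "Elokuva:" 7 (by decide) (by decide) (by decide) (by decide) h1).symm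
  by_cases h2 : PySem.Str.startswith t "Kino:" = true
  · simp only [agpLoop, h1, h2, if_true, if_false, Bool.false_eq_true]
    exact (alt_matched t "Kino:" 4 (by decide) (by decide) (by decide) (by decide) h2).symm
  by_cases h3 : PySem.Str.startswith t "Kino Klassikko:" = true
  · simp only [agpLoop, h1, h2, h3, if_true, if_false, Bool.false_eq_true]
    exact (alt_matched t "Kino Klassikko:" 14 (by decide) (by decide) (by decide) (by decide) h3).symm
  by_cases h4 : PySem.Str.startswith t "Kino Suomi:" = true
  · simp only [agpLoop, h1, h2, h3, h4, if_true, if_false, Bool.false_eq_true]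
    exact (alt_matched t "Kino Suomi:" 10 (by decide) (by decide) (by decide) (by decide) h4).symm
  by_cases h5 : PySem.Str.startswith t "Kotikatsomo:" = true
  · simp only [agpLoop, h1, h2, h3, h4, h5, if_true, if_false, Bool.false_eq_true]
    exact (alt_matched t "Kotikatsomo:" 11 (by decide) (by decide) (by decide) (by decide) h5).symm
  by_cases h6 : PySem.Str.startswith t "Uusi Kino:" = true
  · simp only [agpLoop, h1, h2, h3, h4, h5, h6, if_true, if_false, Bool.false_eq_true]
    exact (alt_matched t "Uusi Kino:" 9 (by decide) (by decide) (by decide) (by decide) h6).symm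
  by_cases h7 : PySem.Str.startswith t "Dok:" = true
  · simp only [agpLoop, h1, h2, h3, h4, h5, h6, h7, if_true, if_false, Bool.false_eq_true]
    exact (alt_matched t "Dok:" 3 (by decide) (by decide) (by decide) (by decide) h7).symm
  by_cases h8 : PySem.Str.startswith t "Dokumenttiprojekti:" = true
  · simp only [agpLoop, h1, h2, h3, h4, h5, h6, h7, h8, if_true, if_false, Bool.false_eq_true]
    exact (alt_matched t "Dokumenttiprojekti:" 18 (by decide) (by decide) (by decide) (by decide) h8).symm
  by_cases h9 : PySem.Str.startswith t "Historia:" = true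
  · simp only [agpLoop, h1, h2, h3, h4, h5, h6, h7, h8, h9, if_true, if_false, Bool.false_eq_true]
    exact (alt_matched t "Historia:" 8 (by decide) (by decide) (by decide) (by decide) h9).symm
  · simp only [agpLoop, h1, h2, h3, h4, h5, h6, h7, h8, h9, if_false, Bool.false_eq_true]
    rw [alt_unmatched t h1 h2 h3 h4 h5 h6 h7 h8 h9]
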